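-- pv_equiv track=rewrite | github.com/hong0708/algorithm | 프로그래머스/프로그래머스_1/신규아이디추천.py | solution
-- ===== SOURCE A (Python) =====
-- def solution(new_id):
--     answer = ''
--     new_id_1 = ""
--
--     for i in range(len(new_id)):
--         if new_id[i].isupper():
--             new_id_1 += new_id[i].lower()
--
--         if new_id[i].isdigit():
--             new_id_1 += new_id[i]
--         if new_id[i].islower():
--             new_id_1 += new_id[i]
--         if new_id[i] == "-":
--             new_id_1 += new_id[i]
--         if new_id[i] == "_":
--             new_id_1 += new_id[i]
--
--         if new_id[i] == ".":
--             if len(new_id_1) == 0: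
--                 pass
--             elif new_id_1[len(new_id_1) - 1] == ".":
--                 pass
--             else:
--                 new_id_1 += new_id[i]
--
--     if len(new_id_1) == 0:
--         new_id_1 += "a"
--
--     if new_id_1[len(new_id_1) - 1] == ".":
--         new_id_1 = new_id_1[:len(new_id_1) - 1]
--
--     if len(new_id_1) > 15:
--         new_id_1 = new_id_1[:15]
--         if new_id_1[14] == ".":
--             new_id_1 = new_id_1[:14]
--
--     new_id_2 = new_id_1[-1]
--     while len(new_id_1) < 3:
--         new_id_1 += new_id_2
--     answer = new_id_1
--     return answer
-- ===== SOURCE B (Python) =====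
-- def solution(new_id):
--     allowed = 'abcdefghijklmnopqrstuvwxyz0123456789-_.'
--     filtered = ''.join(c for c in new_id.lower() if c in allowed)
--     s = '.'.join(p for p in filtered.split('.') if p) or 'a'
--     s = s[:15].rstrip('.')
--     return s + s[-1] * (3 - len(s))
-- ===== Notes on version B (the rewrite author's own statement) =====
-- stated objective: faster
-- what changed: Replaces A's single stateful per-char loop (five predicate branches plus an inline dot-collapse against the growing accumulator, then strip/truncate/pad fix-ups with an explicit while-loop) by a pipeline of bulk string operations: lowercase the whole string and filter by membership in an allowed-charset constant, collapse/strip dots by split-on-dot/drop-empties/rejoin instead of a stateful scan, then slice, rstrip and arithmetic padding; equivalent on the ASCII domain.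
import Mathlib
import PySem

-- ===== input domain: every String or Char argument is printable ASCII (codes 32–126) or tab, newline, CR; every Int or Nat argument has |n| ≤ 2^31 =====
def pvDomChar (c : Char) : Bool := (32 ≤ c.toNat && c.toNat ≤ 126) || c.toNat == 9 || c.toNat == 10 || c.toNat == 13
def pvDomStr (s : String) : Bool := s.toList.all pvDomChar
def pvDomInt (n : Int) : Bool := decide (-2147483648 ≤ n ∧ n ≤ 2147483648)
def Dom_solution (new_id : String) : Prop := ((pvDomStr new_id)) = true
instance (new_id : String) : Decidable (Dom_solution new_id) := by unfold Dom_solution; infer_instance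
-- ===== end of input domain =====

-- B replaces A's single stateful loop (char predicates + inline dot-collapse against the growing
-- accumulator) with lower-then-charset-filter, a split-on-'.'/drop-empties/rejoin collapse, and
-- slice+rstrip+pad fix-ups; equivalence is claimed on Dom (ASCII), where per-char lower = str.lower.


-- ===== PORT A =====
-- A's loop body: a chain of independent ifs appending to new_id_1
def stepA (acc : List Char) (c : Char) : List Char :=
  let acc := if PySem.Chars.isupper c then acc ++ [PySem.Chars.lowerChar c] else acc
  let acc := if PySem.Chars.isdigit c then acc ++ [c] else acc
  let acc := if PySem.Chars.islower c then acc ++ [c] else acc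
  let acc := if c = '-' then acc ++ [c] else acc
  let acc := if c = '_' then acc ++ [c] else acc
  if c = '.' then
    match acc.getLast? with          -- len == 0 → pass; new_id_1[len(new_id_1)-1] is the last char
    | none => acc
    | some l => if l = '.' then acc else acc ++ [c]
  else acc

-- A's final while-loop: append the saved char new_id_2 until length ≥ 3
def padA (l : List Char) (c : Char) : List Char :=
  if l.length < 3 then padA (l ++ [c]) c else l
termination_by 3 - l.length
decreasing_by simp; omega

def solution (new_id : String) : String :=
  let s1 := new_id.toList.foldl stepA []
  let s1 := if s1.length = 0 then s1 ++ ['a'] else s1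
  let s1 := match s1.getLast? with
    | some l => if l = '.' then s1.take (s1.length - 1) else s1
    | none => s1
  let s1 := if s1.length > 15 then
      let t := s1.take 15
      if PySem.List.pyGet? t 14 = some '.' then t.take 14 else t
    else s1
  match s1.getLast? with               -- new_id_2 = new_id_1[-1] (the list is never empty here)
  | none => String.ofList s1
  | some c2 => String.ofList (padA s1 c2)

-- ===== PORT B =====
def allowedB : List Char := "abcdefghijklmnopqrstuvwxyz0123456789-_.".toList

def solution_alt (new_id : String) : String :=
  -- ''.join(c for c in new_id.lower() if c in allowed): filter after lowering
  let filtered := (PySem.Chars.lower new_id.toList).filter (fun c => allowedB.contains c)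
  -- '.'.join(p for p in filtered.split('.') if p) or 'a'
  let s := PySem.Chars.join ['.'] ((PySem.Chars.splitOn filtered ['.']).filter (fun p => p ≠ []))
  let s := if s = [] then ['a'] else s
  -- s[:15].rstrip('.') — rstrip('.') ported by hand (exact): drop the trailing run of '.'
  let s := ((s.take 15).reverse.dropWhile (fun c => c = '.')).reverse
  -- s + s[-1] * (3 - len(s)); s[-1] = getLast? (Source B's s is provably nonempty, none unreachable)
  match s.getLast? with
  | none => String.ofList s
  | some c => String.ofList (s ++ List.replicate (3 - s.length) c)

-- ===== PRECONDITION & SPEC =====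
def Spec_solution (new_id : String) (out : String) : Prop := out = solution_alt new_id
instance (new_id : String) (out : String) : Decidable (Spec_solution new_id out) := by unfold Spec_solution; infer_instance

-- ===== CLAIM =====
def Claim_equal_solution : Prop := ∀ (new_id : String), Dom_solution new_id → Spec_solution new_id (solution new_id)

-- ===== LEMMAS AND PROOFS =====
def keepB (c : Char) : Bool :=
  PySem.Chars.isupper c || PySem.Chars.isdigit c || PySem.Chars.islower c
    || c = '-' || c = '_' || c = '.'
def mapB (c : Char) : Char := if PySem.Chars.isupper c then PySem.Chars.lowerChar c else c

def stepB (s : List Char) (c : Char) : List Char :=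
  if c ≠ '.' ∨ (s ≠ [] ∧ s.getLast? ≠ some '.') then s ++ [c] else s

-- per-char agreement of A's loop body with the keep/normalize + dot-collapse view
theorem stepA_eq (acc : List Char) (c : Char) :
    stepA acc c = if keepB c then stepB acc (mapB c) else acc := by
  by_cases hu : PySem.Chars.isupper c = true
  · have hn : 65 ≤ c.toNat ∧ c.toNat ≤ 90 := by
      simpa [PySem.Chars.isupper, Char.le_def, UInt32.le_iff_toNat_le] using hu
    have hd : PySem.Chars.isdigit c = false := by
      simp [PySem.Chars.isdigit, Char.le_def, UInt32.le_iff_toNat_le]; omega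
    have hl : PySem.Chars.islower c = false := by
      simp [PySem.Chars.islower, Char.le_def, UInt32.le_iff_toNat_le]; omega
    have hm : c ≠ '-' := fun h => by subst h; exact absurd hn (by decide)
    have hus : c ≠ '_' := fun h => by subst h; exact absurd hn (by decide)
    have hdot : c ≠ '.' := fun h => by subst h; exact absurd hn (by decide)
    have hlc : PySem.Chars.lowerChar c ≠ '.' := by
      intro he
      have h2 := congrArg Char.toNat he
      rw [PySem.Chars.lowerChar, if_pos hu, Char.toNat_ofNat, if_pos (Or.inl (by omega))] at h2
      have : ('.').toNat = 46 := by decide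
      omega
    simp [stepA, stepB, keepB, mapB, hu, hd, hl, hm, hus, hdot, hlc]
  · by_cases hd : PySem.Chars.isdigit c = true
    · have hn : 48 ≤ c.toNat ∧ c.toNat ≤ 57 := by
        simpa [PySem.Chars.isdigit, Char.le_def, UInt32.le_iff_toNat_le] using hd
      have hl : PySem.Chars.islower c = false := by
        simp [PySem.Chars.islower, Char.le_def, UInt32.le_iff_toNat_le]; omega
      have hm : c ≠ '-' := fun h => by subst h; exact absurd hn (by decide)
      have hus : c ≠ '_' := fun h => by subst h; exact absurd hn (by decide)
      have hdot : c ≠ '.' := fun h => by subst h; exact absurd hn (by decide)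
      simp [stepA, stepB, keepB, mapB, hu, hd, hl, hm, hus, hdot]
    · by_cases hl : PySem.Chars.islower c = true
      · have hn : 97 ≤ c.toNat ∧ c.toNat ≤ 122 := by
          simpa [PySem.Chars.islower, Char.le_def, UInt32.le_iff_toNat_le] using hl
        have hm : c ≠ '-' := fun h => by subst h; exact absurd hn (by decide)
        have hus : c ≠ '_' := fun h => by subst h; exact absurd hn (by decide)
        have hdot : c ≠ '.' := fun h => by subst h; exact absurd hn (by decide)
        simp [stepA, stepB, keepB, mapB, hu, hd, hl, hm, hus, hdot]
      · by_cases hm : c = '-'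
        · subst hm; simp [stepA, stepB, keepB, mapB, hu, hd, hl]
        · by_cases hus : c = '_'
          · subst hus; simp [stepA, stepB, keepB, mapB, hu, hd, hl]
          · by_cases hdot : c = '.'
            · subst hdot
              simp only [stepA, stepB, keepB, mapB]
              simp only [hu, hd, hl, Bool.false_or, if_neg hm, if_neg hus, ite_true]
              norm_num
              cases h : List.getLast? acc with
              | none =>
                have : acc = [] := List.getLast?_eq_none_iff.mp h
                simp [this]
              | some l =>
                have hne : acc ≠ [] := by
                  intro h0; subst h0; simp at h
                by_cases hld : l = '.'
                · subst hld; simp [hne]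
                · simp [hne, hld]
            · simp [stepA, keepB, hu, hd, hl, hm, hus, hdot]

-- A's whole loop = the dot-collapse fold over the kept, normalized chars
theorem fold_eq (l : List Char) (acc : List Char) :
    l.foldl stepA acc = ((l.filter keepB).map mapB).foldl stepB acc := by
  induction l generalizing acc with
  | nil => rfl
  | cons c t ih =>
    by_cases h : keepB c = true
    · simp [h, List.foldl, stepA_eq, ih]
    · simp [h, List.foldl, stepA_eq, ih]

set_option maxRecDepth 4096 in
theorem ascii_fact : ∀ n : Fin 128,
    ((keepB (Char.ofNat n.val) == allowedB.contains (PySem.Chars.lowerChar (Char.ofNat n.val))) &&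
     (!(keepB (Char.ofNat n.val)) || (mapB (Char.ofNat n.val) == PySem.Chars.lowerChar (Char.ofNat n.val)))) = true := by
  decide

theorem dom_lt (c : Char) (h : pvDomChar c = true) : c.toNat < 128 := by
  simp only [pvDomChar, Bool.or_eq_true, Bool.and_eq_true, decide_eq_true_eq, beq_iff_eq] at h
  omega

theorem charFact (c : Char) (h : pvDomChar c = true) :
    keepB c = allowedB.contains (PySem.Chars.lowerChar c) ∧
    (keepB c = true → mapB c = PySem.Chars.lowerChar c) := by
  have := ascii_fact ⟨c.toNat, dom_lt c h⟩
  rw [Char.ofNat_toNat] at this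
  simp only [Bool.and_eq_true, beq_iff_eq, Bool.or_eq_true, Bool.not_eq_eq_eq_not, Bool.not_true] at this
  refine ⟨this.1, fun hk => ?_⟩
  rcases this.2 with h2 | h2
  · rw [hk] at h2; cases h2
  · exact h2

theorem filtered_eq (cs : List Char) (h : cs.all pvDomChar = true) :
    (cs.filter keepB).map mapB = (PySem.Chars.lower cs).filter (fun c => allowedB.contains c) := by
  simp only [List.all_eq_true] at h
  rw [PySem.Chars.lower, List.filter_map]
  simp only [Function.comp_def]
  rw [List.filter_congr (fun c hc => ((charFact c (h c hc)).1).symm)]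
  exact List.map_congr_left fun c hc =>
    (charFact c (h c (List.mem_of_mem_filter hc))).2 (List.of_mem_filter hc)

def parts : List Char → List (List Char)
  | [] => [[]]
  | c :: t => if c = '.' then [] :: parts t
              else match parts t with
                   | [] => [[c]]
                   | h :: tl => (c :: h) :: tl

theorem parts_ne_nil (l : List Char) : parts l ≠ [] := by
  cases l with
  | nil => simp [parts]
  | cons c t =>
    simp only [parts]
    split
    · simp
    · split <;> simp

theorem go_eq (fuel : Nat) (l cur : List Char) (acc : List (List Char)) (hf : l.length < fuel) :
    PySem.Chars.splitOn.go ['.'] fuel l cur acc =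
      acc.reverse ++ ((cur.reverse ++ (parts l).headI) :: (parts l).tail) := by
  induction fuel generalizing l cur acc with
  | zero => omega
  | succ fuel ih =>
    cases l with
    | nil =>
      cases fuel with
      | zero => simp [PySem.Chars.splitOn.go, parts]
      | succ f => rw [show PySem.Chars.splitOn.go ['.'] (f+1+1) [] cur acc =
            (cur.reverse :: acc).reverse from rfl]; simp [parts]
    | cons c rest =>
      rw [show PySem.Chars.splitOn.go ['.'] (fuel+1) (c :: rest) cur acc =
            (if ['.'].isPrefixOf (c :: rest) then
              PySem.Chars.splitOn.go ['.'] fuel (List.drop 1 (c::rest)) [] (cur.reverse :: acc)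
            else PySem.Chars.splitOn.go ['.'] fuel rest (c :: cur) acc) from rfl]
      by_cases hc : c = '.'
      · subst hc
        have hpre : List.isPrefixOf ['.'] ('.' :: rest) = true := by
          simp [List.isPrefixOf]
        rw [if_pos hpre]
        rw [ih _ _ _ (by simpa using Nat.lt_of_succ_lt_succ (Nat.lt_of_lt_of_le hf (le_refl _)) )]
        simp [parts]
        cases hh : parts rest with
        | nil => exact absurd hh (parts_ne_nil rest)
        | cons a b => rfl
      · have hpre : List.isPrefixOf ['.'] (c :: rest) = false := by
          simp [List.isPrefixOf]; exact fun h => (hc h.symm).elim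
        rw [if_neg (by simp [hpre])]
        rw [ih _ _ _ (by simp at hf ⊢; omega)]
        obtain ⟨h, tl, hp⟩ : ∃ h tl, parts rest = h :: tl := by
          cases hh : parts rest with
          | nil => exact absurd hh (parts_ne_nil rest)
          | cons a b => exact ⟨a, b, rfl⟩
        simp [parts, hc, hp]

theorem splitOn_eq_parts (l : List Char) : PySem.Chars.splitOn l ['.'] = parts l := by
  rw [PySem.Chars.splitOn, go_eq _ _ _ _ (by omega)]
  obtain ⟨h, tl, hp⟩ : ∃ h tl, parts l = h :: tl := by
    cases hh : parts l with
    | nil => exact absurd hh (parts_ne_nil l)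
    | cons a b => exact ⟨a, b, rfl⟩
  simp [hp]

def J (l : List Char) : List Char :=
  PySem.Chars.join ['.'] ((parts l).filter (fun p => p ≠ []))

theorem parts_snoc_dot (l : List Char) : parts (l ++ ['.']) = parts l ++ [[]] := by
  induction l with
  | nil => simp [parts]
  | cons c t ih =>
    by_cases hc : c = '.'
    · subst hc; simp [parts, ih]
    · simp only [List.cons_append, parts, if_neg hc, ih]
      cases hh : parts t with
      | nil => exact absurd hh (parts_ne_nil t)
      | cons a b => simp

theorem parts_snoc (l : List Char) (c : Char) (hc : c ≠ '.') :
    parts (l ++ [c]) = (parts l).dropLast ++ [((parts l).getLastD []) ++ [c]] := by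
  induction l with
  | nil => simp [parts, hc]
  | cons d t ih =>
    obtain ⟨a, b, hh⟩ : ∃ a b, parts t = a :: b := by
      cases hh : parts t with
      | nil => exact absurd hh (parts_ne_nil t)
      | cons a b => exact ⟨a, b, rfl⟩
    rw [hh] at ih
    by_cases hd : d = '.'
    · subst hd
      simp only [List.cons_append, parts, ih, hh]
      cases b <;> simp
    · simp only [List.cons_append, parts, if_neg hd, ih, hh]
      cases b <;> simp

theorem parts_getLastD_nil (l : List Char) :
    ((parts l).getLastD [] = []) ↔ (l = [] ∨ l.getLast? = some '.') := by
  induction l using List.reverseRecOn with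
  | nil => simp [parts]
  | append_singleton t c _ =>
    by_cases hc : c = '.'
    · subst hc
      rw [parts_snoc_dot]
      simp
    · rw [parts_snoc t c hc]
      simp [hc]

theorem joinSnoc (qs : List (List Char)) (q : List Char) :
    PySem.Chars.join ['.'] (qs ++ [q]) =
      if qs = [] then q else PySem.Chars.join ['.'] qs ++ '.' :: q := by
  induction qs with
  | nil => simp [PySem.Chars.join_singleton]
  | cons p rest ih =>
    cases rest with
    | nil => simp [PySem.Chars.join_cons_cons, PySem.Chars.join_singleton]
    | cons r rs =>
      rw [show (p :: r :: rs) ++ [q] = p :: (r :: (rs ++ [q])) from rfl,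
          PySem.Chars.join_cons_cons,
          show r :: (rs ++ [q]) = (r :: rs) ++ [q] from rfl, ih,
          PySem.Chars.join_cons_cons]
      simp

theorem join_eq_nil_iff (qs : List (List Char)) (hq : ∀ q ∈ qs, q ≠ []) :
    PySem.Chars.join ['.'] qs = [] ↔ qs = [] := by
  induction qs using List.reverseRecOn with
  | nil => simp [PySem.Chars.join_nil]
  | append_singleton rest q _ =>
    rw [joinSnoc]
    constructor
    · intro h
      split at h
      · exact absurd h (hq q (by simp))
      · simp at h
    · intro h; simp at h

def dd (a b : Char) : Prop := a ≠ '.' ∨ b ≠ '.'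

theorem filter_ne_nil_mem {qs : List (List Char)} {q : List Char}
    (h : q ∈ qs.filter (fun p => p ≠ [])) : q ≠ [] := by
  have := List.of_mem_filter h
  simpa using this

theorem main_inv (l : List Char) :
    List.foldl stepB [] l = J l ++ (if J l ≠ [] ∧ l.getLast? = some '.' then ['.'] else []) ∧
    (J l).getLast? ≠ some '.' ∧
    List.IsChain dd (J l) := by
  induction l using List.reverseRecOn with
  | nil =>
    refine ⟨?_, ?_, ?_⟩ <;> simp [J, parts, PySem.Chars.join_nil]
  | append_singleton l c ih =>
    obtain ⟨hR, hlast, hch⟩ := ih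
    rw [List.foldl_append, List.foldl_cons, List.foldl_nil, hR]
    by_cases hc : c = '.'
    · subst hc
      have hJ : J (l ++ ['.']) = J l := by
        simp [J, parts_snoc_dot, List.filter_append]
      rw [hJ, List.getLast?_concat]
      refine ⟨?_, hlast, hch⟩
      by_cases hJn : J l = []
      · simp [hJn, stepB]
      · by_cases hd : l.getLast? = some '.'
        · rw [if_pos ⟨hJn, hd⟩, if_pos ⟨hJn, rfl⟩]
          rw [stepB, if_neg]
          simp
        · rw [if_neg (by tauto)]
          simp only [List.append_nil]
          rw [if_pos ⟨hJn, trivial⟩, stepB, if_pos (Or.inr ⟨hJn, hlast⟩)]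
    · -- c ≠ '.'
      obtain ⟨ps', p, hpp⟩ : ∃ ps' p, parts l = ps' ++ [p] := by
        rcases List.eq_nil_or_concat (parts l) with h | ⟨a, b, h⟩
        · exact absurd h (parts_ne_nil l)
        · exact ⟨a, b, by simpa using h⟩
      have hps : parts (l ++ [c]) = ps' ++ [p ++ [c]] := by
        rw [parts_snoc l c hc, hpp]; simp
      have hJl : J l = PySem.Chars.join ['.']
          (ps'.filter (fun q => q ≠ []) ++ if p = [] then [] else [p]) := by
        rw [J, hpp, List.filter_append]
        by_cases hp : p = [] <;> simp [hp]
      have hJ' : J (l ++ [c]) = PySem.Chars.join ['.']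
          (ps'.filter (fun q => q ≠ []) ++ [p ++ [c]]) := by
        rw [J, hps, List.filter_append]
        simp
      set fd := ps'.filter (fun q => q ≠ []) with hfd
      have hLc : (l ++ [c]).getLast? = some c := List.getLast?_concat
      have hnd : ¬ ((l ++ [c]).getLast? = some '.') := by rw [hLc]; simp [hc]
      by_cases hp : p = []
      · subst hp
        have hJl2 : J l = PySem.Chars.join ['.'] fd := by simpa using hJl
        have hgl : (parts l).getLastD [] = [] := by rw [hpp]; simp
        by_cases hfn : fd = []
        · have hJn : J l = [] := by rw [hJl2, hfn, PySem.Chars.join_nil]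
          have hJc : J (l ++ [c]) = [c] := by rw [hJ', hfn]; simp [PySem.Chars.join_singleton]
          rw [hJn, hJc]
          refine ⟨?_, by simp [hc], by simp⟩
          rw [if_neg (by simp), if_neg (by rw [hLc]; simp [hc])]
          simp [stepB, hc]
        · have hJn : J l ≠ [] := by
            rw [hJl2]
            intro h
            exact hfn ((join_eq_nil_iff fd (fun q hq => filter_ne_nil_mem hq)).mp h)
          have hdot : l.getLast? = some '.' := by
            rcases (parts_getLastD_nil l).mp hgl with h | h
            · subst h
              simp [parts] at hpp
              have hfd0 : fd = [] := by rw [hfd, hpp]; rfl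
              exact absurd hfd0 hfn
            · exact h
          have hJc : J (l ++ [c]) = J l ++ ['.', c] := by
            rw [hJ', joinSnoc, if_neg hfn, hJl2]
            simp
          rw [if_pos ⟨hJn, hdot⟩, hJc]
          refine ⟨?_, by simp [hc], ?_⟩
          · rw [if_neg (by rw [hLc]; simp [hc])]
            rw [stepB, if_pos (Or.inl hc)]
            simp
          · rw [List.isChain_append]
            refine ⟨hch, by simp [dd, hc], ?_⟩
            intro x hx y hy
            simp at hy
            subst hy
            left
            intro hxe
            rw [hxe] at hx
            exact hlast hx
      · -- p ≠ []
        have hJl2 : J l = PySem.Chars.join ['.'] (fd ++ [p]) := by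
          rw [hJl, if_neg hp]
        have hgl : (parts l).getLastD [] = p := by rw [hpp]; simp
        have hnotdot : ¬ (l.getLast? = some '.') := by
          intro h
          have := (parts_getLastD_nil l).mpr (Or.inr h)
          rw [hgl] at this
          exact hp this
        have hJc : J (l ++ [c]) = J l ++ [c] := by
          rw [hJ', hJl2, joinSnoc, joinSnoc]
          by_cases hfn : fd = [] <;> simp [hfn]
        have hJn : J l ≠ [] := by
          rw [hJl2, joinSnoc]
          by_cases hfn : fd = [] <;> simp [hfn, hp]
        rw [if_neg (by tauto), hJc]
        refine ⟨?_, by simp [hc], ?_⟩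
        · rw [if_neg (by rw [hLc]; simp [hc])]
          rw [stepB, if_pos (Or.inl hc)]
          simp
        · rw [List.isChain_append]
          exact ⟨hch, by simp, fun x _ y hy => by simp at hy; subst hy; exact Or.inr hc⟩

theorem dropWhile_self_of_head {p : Char → Bool} {l : List Char}
    (h : ∀ x ∈ l.head?, ¬ p x = true) : l.dropWhile p = l := by
  cases l with
  | nil => rfl
  | cons a t =>
    rw [List.dropWhile_cons, if_neg]
    simp at h
    simp [h]

theorem trunc_eq (s : List Char) (_hne : s ≠ []) (hl : s.getLast? ≠ some '.')
    (hch : List.IsChain dd s) :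
    (if s.length > 15 then
        (if PySem.List.pyGet? (s.take 15) 14 = some '.' then (s.take 15).take 14 else s.take 15)
      else s)
    = ((s.take 15).reverse.dropWhile (fun c => c = '.')).reverse := by
  by_cases h15 : s.length > 15
  · rw [if_pos h15]
    have hlen : (s.take 15).length = 15 := by simp; omega
    have htne : s.take 15 ≠ [] := by intro h; rw [h] at hlen; simp at hlen
    have hget : PySem.List.pyGet? (s.take 15) 14 = (s.take 15).getLast? := by
      rw [List.getLast?_eq_getElem?, hlen]
      simp [PySem.List.pyGet?, PySem.List.pyIdx?, hlen]
    have hcht : List.IsChain dd (s.take 15) := hch.take 15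
    by_cases hd : (s.take 15).getLast? = some '.'
    · rw [if_pos (by rw [hget, hd])]
      have hdecomp : s.take 15 = (s.take 15).dropLast ++ ['.'] := by
        conv_lhs => rw [← List.dropLast_append_getLast htne]
        rw [List.getLast_of_mem_getLast? hd]
      have hlink : ∀ x ∈ (s.take 15).dropLast.getLast?, x ≠ '.' := by
        rw [hdecomp] at hcht
        rcases List.isChain_append.mp hcht with ⟨_, _, hlink⟩
        intro x hx
        rcases hlink x hx '.' (by simp) with h | h
        · exact h
        · exact absurd rfl h
      calc (s.take 15).take 14
          = (s.take 15).dropLast := by rw [List.dropLast_eq_take, hlen]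
        _ = (((s.take 15).dropLast.reverse).dropWhile (fun c => c = '.')).reverse := by
              rw [dropWhile_self_of_head, List.reverse_reverse]
              intro x hx
              rw [List.head?_reverse] at hx
              simpa using hlink x hx
        _ = ((s.take 15).reverse.dropWhile (fun c => c = '.')).reverse := by
              conv_rhs => rw [hdecomp]
              simp
    · rw [if_neg (by rw [hget]; exact hd)]
      rw [dropWhile_self_of_head, List.reverse_reverse]
      intro x hx
      rw [List.head?_reverse] at hx
      intro hp
      simp at hp
      rw [hp] at hx
      exact hd hx
  · rw [if_neg h15]
    have ht : s.take 15 = s := List.take_of_length_le (by omega)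
    rw [ht, dropWhile_self_of_head, List.reverse_reverse]
    intro x hx
    rw [List.head?_reverse] at hx
    intro hp
    simp at hp
    rw [hp] at hx
    exact hl hx

theorem padA_eq (s : List Char) (c : Char) : padA s c = s ++ List.replicate (3 - s.length) c := by
  match s with
  | [] => rw [padA]; simp only [if_pos (by simp : ([]:List Char).length < 3)]; rw [padA]; simp; rw [padA]; simp; rw [padA]; simp
  | [a] => rw [padA]; simp; rw [padA]; simp; rw [padA]; simp
  | [a, b] => rw [padA]; simp; rw [padA]; simp
  | a :: b :: d :: t =>
    rw [padA, if_neg (by simp)]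
    simp


-- the shared tail stages of the two programs, as proof-side views (defeq to the port bodies)
def truncPadA (s : List Char) : String :=
  let s1 := if s.length > 15 then
      let t := s.take 15
      if PySem.List.pyGet? t 14 = some '.' then t.take 14 else t
    else s
  match s1.getLast? with
  | none => String.ofList s1
  | some c2 => String.ofList (padA s1 c2)

def tailA (s0 : List Char) : String :=
  let s1 := if s0.length = 0 then s0 ++ ['a'] else s0
  let s1 := match s1.getLast? with
    | some l => if l = '.' then s1.take (s1.length - 1) else s1
    | none => s1
  truncPadA s1

def truncPadB (s : List Char) : String :=
  let s' := ((s.take 15).reverse.dropWhile (fun c => c = '.')).reverse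
  match s'.getLast? with
  | none => String.ofList s'
  | some c => String.ofList (s' ++ List.replicate (3 - s'.length) c)

def tailB (s : List Char) : String := truncPadB (if s = [] then ['a'] else s)

theorem truncPad_eq (s : List Char) (hne : s ≠ []) (hlast : s.getLast? ≠ some '.')
    (hch : List.IsChain dd s) : truncPadA s = truncPadB s := by
  simp only [truncPadA, truncPadB]
  rw [← trunc_eq s hne hlast hch]
  generalize (if s.length > 15 then
      (if PySem.List.pyGet? (s.take 15) 14 = some '.' then (s.take 15).take 14 else s.take 15)
    else s) = s3
  cases s3.getLast? with
  | none => rfl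
  | some c2 => simp only [padA_eq]

theorem tail_full (Jv : List Char) (e : Prop) [Decidable e]
    (hlast : Jv.getLast? ≠ some '.') (hch : List.IsChain dd Jv) :
    tailA (Jv ++ (if Jv ≠ [] ∧ e then ['.'] else [])) = tailB Jv := by
  by_cases hJ : Jv = []
  · subst hJ
    rw [if_neg (by simp)]
    simp [tailA, tailB, truncPadA, truncPadB, padA_eq]
  · by_cases he : e
    · rw [if_pos ⟨hJ, he⟩]
      simp only [tailA]
      rw [if_neg (by simp), List.getLast?_concat]
      have htake : (Jv ++ ['.']).take ((Jv ++ ['.']).length - 1) = Jv := by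
        simp
      simp only [htake]
      rw [tailB, if_neg hJ]
      exact truncPad_eq Jv hJ hlast hch
    · rw [if_neg (by tauto), List.append_nil]
      simp only [tailA]
      rw [if_neg (by simpa using hJ)]
      cases hg : Jv.getLast? with
      | none => exact absurd (List.getLast?_eq_none_iff.mp hg) hJ
      | some x =>
        have hx : x ≠ '.' := by rintro rfl; exact hlast hg
        simp only [if_neg hx]
        rw [tailB, if_neg hJ]
        exact truncPad_eq Jv hJ hlast hch

-- ===== VERDICT =====
theorem solution_spec : Claim_equal_solution := by
  intro new_id hdom
  show solution new_id = solution_alt new_id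
  have hdom' : new_id.toList.all pvDomChar = true := hdom
  rw [show solution new_id = tailA (new_id.toList.foldl stepA []) from rfl,
      show solution_alt new_id = tailB (PySem.Chars.join ['.']
        ((PySem.Chars.splitOn ((PySem.Chars.lower new_id.toList).filter
          (fun c => allowedB.contains c)) ['.']).filter (fun p => p ≠ []))) from rfl]
  rw [fold_eq, filtered_eq _ hdom', splitOn_eq_parts]
  rw [show PySem.Chars.join ['.'] ((parts ((PySem.Chars.lower new_id.toList).filter
        (fun c => allowedB.contains c))).filter (fun p => p ≠ []))
      = J ((PySem.Chars.lower new_id.toList).filter (fun c => allowedB.contains c)) from rfl]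
  obtain ⟨hR, hlast, hch⟩ :=
    main_inv ((PySem.Chars.lower new_id.toList).filter (fun c => allowedB.contains c))
  rw [hR]
  exact tail_full _ _ hlast hch
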